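-- pv_equiv track=rewrite | github.com/666ghj/BettaFish | ReportEngine/agent.py | _extract_template_title
-- ===== SOURCE A (Python) =====
-- def _extract_template_title(template_markdown: str, fallback: str = "") -> str:
--     """尝试从Markdown中提取首个标题，找不到时使用fallback"""
--     for line in template_markdown.splitlines():
--         stripped = line.strip()
--         if not stripped:
--             continue
--         if stripped.startswith("#"):
--             return stripped.lstrip("#").strip()
--         if stripped:
--             fallback = fallback or stripped
--     return fallback or "智能舆情分析报告"
-- ===== SOURCE B (Python) =====
-- def _extract_template_title(template_markdown: str, fallback: str = "") -> str:
--     # Reverse scan: overwriting accumulators make the FIRST heading / FIRST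
--     # non-empty line the last assignments, so one backwards pass suffices.
--     title = None
--     first = ""
--     for line in reversed(template_markdown.splitlines()):
--         s = line.strip()
--         if s.startswith("#"):
--             title = s.lstrip("#").strip()
--         elif s:
--             first = s
--     if title is not None:
--         return title
--     return fallback or first or "智能舆情分析报告"
-- ===== Notes on version B (the rewrite author's own statement) =====
-- stated objective: alternative
-- what changed: A scans forward returning early at the first heading while threading a fallback accumulator; B scans the lines in reverse with two overwrite accumulators (last-seen heading, last-seen non-empty line), so the first heading and first non-empty line fall out as the final overwrites and the result is combined once at the end.
import Mathlib
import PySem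

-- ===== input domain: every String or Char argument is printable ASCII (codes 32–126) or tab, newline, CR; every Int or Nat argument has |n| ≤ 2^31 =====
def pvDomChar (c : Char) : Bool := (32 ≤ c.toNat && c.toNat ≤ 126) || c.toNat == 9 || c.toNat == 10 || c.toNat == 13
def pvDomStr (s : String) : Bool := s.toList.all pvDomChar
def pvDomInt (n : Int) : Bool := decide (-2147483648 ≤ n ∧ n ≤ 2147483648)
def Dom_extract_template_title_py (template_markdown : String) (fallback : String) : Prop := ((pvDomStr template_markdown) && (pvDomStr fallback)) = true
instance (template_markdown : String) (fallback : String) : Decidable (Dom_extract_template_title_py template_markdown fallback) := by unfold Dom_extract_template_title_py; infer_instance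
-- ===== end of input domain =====

-- B replaces A's forward early-return scan with a reverse pass using overwrite accumulators (last heading / last non-empty line seen): different traversal order, same cost.

-- s.lstrip("#") ported by hand (PySem has no chars-argument lstrip): exact — drops exactly the leading '#' characters.
def pyLstripHash (s : String) : String := String.ofList (s.toList.dropWhile (· == '#'))

-- ===== PORT A =====
def extract_template_title_py_loop : List String → String → String
  | [], fb => if fb ≠ "" then fb else "智能舆情分析报告"
  | line :: rest, fb =>
    let stripped := PySem.Str.strip line
    if stripped = "" then extract_template_title_py_loop rest fb
    else if PySem.Str.startswith stripped "#" then PySem.Str.strip (pyLstripHash stripped)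
    else extract_template_title_py_loop rest (if fb ≠ "" then fb else stripped)

def extract_template_title_py (template_markdown : String) (fallback : String) : String :=
  extract_template_title_py_loop (PySem.Str.splitlines template_markdown) fallback

-- ===== PORT B =====
-- one reverse-loop iteration: overwrite title on a heading, else overwrite first on a non-empty line
def altStep (acc : Option String × String) (line : String) : Option String × String :=
  let s := PySem.Str.strip line
  if PySem.Str.startswith s "#" then (some (PySem.Str.strip (pyLstripHash s)), acc.2)
  else if s ≠ "" then (acc.1, s)
  else acc

def extract_template_title_py_alt (template_markdown : String) (fallback : String) : String :=
  let r := ((PySem.Str.splitlines template_markdown).reverse).foldl altStep (none, "")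
  match r.1 with
  | some t => t
  | none =>
    let f := if fallback ≠ "" then fallback else r.2
    if f ≠ "" then f else "智能舆情分析报告"

-- ===== PRECONDITION & SPEC =====
def Spec_extract_template_title_py (template_markdown : String) (fallback : String) (out : String) : Prop := out = extract_template_title_py_alt template_markdown fallback
instance (template_markdown : String) (fallback : String) (out : String) : Decidable (Spec_extract_template_title_py template_markdown fallback out) := by unfold Spec_extract_template_title_py; infer_instance

-- ===== CLAIM =====
def Claim_equal_extract_template_title_py : Prop := ∀ (template_markdown : String) (fallback : String), Dom_extract_template_title_py template_markdown fallback → Spec_extract_template_title_py template_markdown fallback (extract_template_title_py template_markdown fallback)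

-- ===== LEMMAS AND PROOFS =====

-- B's final combination, on an arbitrary accumulator / fallback
def altCombine (r : Option String × String) (fb : String) : String :=
  match r.1 with
  | some t => t
  | none =>
    let f := if fb ≠ "" then fb else r.2
    if f ≠ "" then f else "智能舆情分析报告"

lemma combine_step (acc : Option String × String) (l fb : String) :
    altCombine (altStep acc l) fb =
      if PySem.Str.startswith (PySem.Str.strip l) "#" = true then
        PySem.Str.strip (pyLstripHash (PySem.Str.strip l))
      else if PySem.Str.strip l = "" then altCombine acc fb
      else altCombine acc (if fb ≠ "" then fb else PySem.Str.strip l) := by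
  obtain ⟨t, f⟩ := acc
  by_cases hh : PySem.Chars.startswith (PySem.Chars.strip l.toList) ['#'] = true
  · simp [altStep, altCombine, hh]
  · by_cases hs : PySem.Str.strip l = ""
    · have h0 : PySem.Chars.startswith [] ['#'] = false := by decide
      simp [altStep, altCombine, hs, h0]
    · cases t with
      | some x => simp [altStep, altCombine, hh, hs]
      | none =>
        by_cases hfb : fb = "" <;> simp [altStep, altCombine, hh, hs, hfb]

lemma loop_eq_combine (ls : List String) (fb : String) :
    extract_template_title_py_loop ls fb
      = altCombine (ls.foldr (fun x acc => altStep acc x) (none, "")) fb := by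
  induction ls generalizing fb with
  | nil =>
    unfold extract_template_title_py_loop altCombine
    by_cases hfb : fb = "" <;> simp [hfb]
  | cons l rest ih =>
    rw [List.foldr_cons, combine_step]
    unfold extract_template_title_py_loop
    by_cases hh : PySem.Chars.startswith (PySem.Chars.strip l.toList) ['#'] = true
    · have hs : PySem.Str.strip l ≠ "" := by
        intro h
        have : l.toList.all pvDomChar = true ∨ True := Or.inr trivial
        have h2 : PySem.Chars.strip l.toList = [] := by
          have := congrArg String.toList h
          simpa [PySem.Str.toList_strip] using this
        rw [h2] at hh
        revert hh
        simp [PySem.Chars.startswith_iff]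
      simp [hh, hs]
    · by_cases hs : PySem.Str.strip l = ""
      · have h0 : PySem.Chars.startswith [] ['#'] = false := by decide
        simp [hs, ih, h0]
      · simp [hh, hs, ih]

-- ===== VERDICT =====
theorem extract_template_title_py_spec : Claim_equal_extract_template_title_py := by
  intro tm fb _
  unfold Spec_extract_template_title_py extract_template_title_py extract_template_title_py_alt
  rw [List.foldl_reverse, loop_eq_combine]
  rfl
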